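-- pv_equiv track=rewrite | github.com/benquick123/code-profiling | code/batch-2/vse-naloge-brez-testov/DN7-M-114.py | preberi_pot
-- ===== SOURCE A (Python) =====
-- def preberi_pot(ukazi):
--     """
--     Za podani seznam ukazov (glej navodila naloge) vrni pot.
--
--     Args:
--         ukazi (str): ukazi, napisani po vrsticah
--
--     Returns:
--         list of tuple of int: pot
--     """
--     smer = (0, -1)
--     lega = (0,0)
--     seznam = [(0,0)]
--     sloD = {(-1, 0): (0, -1), (0, -1): (1, 0), (1, 0): (0, 1), (0, 1): (-1, 0)}
--     sloL = {(1, 0): (0, -1), (0, -1): (-1, 0), (-1, 0): (0, 1), (0, 1): (1, 0)}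
--     for x in ukazi.split('\n'):
--         if x == 'LEVO' or x == 'DESNO':
--             smer = sloD[smer] if x == 'DESNO' else sloL[smer]
--         else:
--             lega = (lega[0] + smer[0]*int(x), lega[1] + smer[1]*int(x))
--             seznam.append(lega)
--     return seznam
-- ===== SOURCE B (Python) =====
-- def preberi_pot(ukazi):
--     """Two-pass re-implementation: first turn the command lines into
--     displacement vectors (heading = integer index into a fixed table),
--     then accumulate the path as prefix sums."""
--     dirs = [(0, -1), (1, 0), (0, 1), (-1, 0)]
--     koraki = []
--     h = 0
--     for vrstica in ukazi.split('\n'):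
--         if vrstica == 'DESNO':
--             h += 1
--         elif vrstica == 'LEVO':
--             h -= 1
--         else:
--             dx, dy = dirs[h % 4]
--             n = int(vrstica)
--             koraki.append((dx * n, dy * n))
--     pot = [(0, 0)]
--     for dx, dy in koraki:
--         px, py = pot[-1]
--         pot.append((px + dx, py + dy))
--     return pot
-- ===== Notes on version B (the rewrite author's own statement) =====
-- stated objective: alternative
-- what changed: B replaces A's direction-tuple state and two rotation dictionaries by an integer heading indexing a fixed 4-entry direction table, and splits the single loop into two passes: one turning command lines into displacement vectors, then a prefix-sum pass building the path.
import Mathlib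
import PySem

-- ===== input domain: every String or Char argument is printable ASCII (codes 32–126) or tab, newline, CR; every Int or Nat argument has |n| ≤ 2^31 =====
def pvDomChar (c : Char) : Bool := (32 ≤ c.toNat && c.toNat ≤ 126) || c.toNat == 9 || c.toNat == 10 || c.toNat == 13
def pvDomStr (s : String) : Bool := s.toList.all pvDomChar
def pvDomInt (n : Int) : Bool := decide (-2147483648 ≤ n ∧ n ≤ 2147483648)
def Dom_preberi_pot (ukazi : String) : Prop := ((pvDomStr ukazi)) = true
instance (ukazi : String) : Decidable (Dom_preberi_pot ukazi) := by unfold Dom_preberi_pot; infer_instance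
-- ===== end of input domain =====

-- B replaces A's tuple heading + two rotation dicts by an integer heading into a fixed
-- direction table and splits the work into a delta pass followed by a prefix-sum pass
-- (objective: alternative; same O(n) cost).

-- ===== PORT A =====
def pvSloD : PySem.Dict (Int × Int) (Int × Int) :=
  PySem.Dict.ofList [((-1,0),(0,-1)), ((0,-1),(1,0)), ((1,0),(0,1)), ((0,1),(-1,0))]
def pvSloL : PySem.Dict (Int × Int) (Int × Int) :=
  PySem.Dict.ofList [((1,0),(0,-1)), ((0,-1),(-1,0)), ((-1,0),(0,1)), ((0,1),(1,0))]

-- loop body of A; dict subscript never misses (smer is always a key), int(x) = none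
-- (ValueError) is excluded by Pre_, so the getD defaults are never reached on Pre_
def pvStepA (st : (Int × Int) × (Int × Int) × List (Int × Int)) (x : String) :
    (Int × Int) × (Int × Int) × List (Int × Int) :=
  let smer := st.1; let lega := st.2.1; let seznam := st.2.2
  if x = "LEVO" ∨ x = "DESNO" then
    (if x = "DESNO" then (pvSloD.get? smer).getD (0,0) else (pvSloL.get? smer).getD (0,0),
     lega, seznam)
  else
    let n := (PySem.Int.ofStr? x).getD 0
    let lega' := (lega.1 + smer.1 * n, lega.2 + smer.2 * n)
    (smer, lega', seznam ++ [lega'])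

def preberi_pot (ukazi : String) : List (Int × Int) :=
  (((PySem.Str.split? ukazi "\n").getD []).foldl pvStepA ((0,-1), (0,0), [(0,0)])).2.2

-- ===== PORT B =====
def pvDirs : List (Int × Int) := [(0,-1),(1,0),(0,1),(-1,0)]

-- first pass: command lines → displacement vectors, heading as an integer mod 4
def pvStepB1 (st : List (Int × Int) × Int) (vrstica : String) : List (Int × Int) × Int :=
  if vrstica = "DESNO" then (st.1, st.2 + 1)
  else if vrstica = "LEVO" then (st.1, st.2 - 1)
  else
    let d := (PySem.List.pyGet? pvDirs (PySem.Int.mod st.2 4)).getD (0,0)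
    let n := (PySem.Int.ofStr? vrstica).getD 0
    (st.1 ++ [(d.1 * n, d.2 * n)], st.2)

-- second pass: prefix sums; pot[-1] always exists (pot starts nonempty)
def pvStepB2 (pot : List (Int × Int)) (dd : Int × Int) : List (Int × Int) :=
  let p := (PySem.List.pyGet? pot (-1)).getD (0,0)
  pot ++ [(p.1 + dd.1, p.2 + dd.2)]

def preberi_pot_alt (ukazi : String) : List (Int × Int) :=
  let koraki := (((PySem.Str.split? ukazi "\n").getD []).foldl pvStepB1 ([], 0)).1
  koraki.foldl pvStepB2 [(0,0)]

-- ===== PRECONDITION & SPEC =====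
-- Pre_ excludes exactly the inputs where Python A raises ValueError: a line that is
-- neither a turn command nor a valid int() literal (B raises there too).
def Pre_preberi_pot (ukazi : String) : Prop :=
  ∀ x ∈ (PySem.Str.split? ukazi "\n").getD [],
    x = "LEVO" ∨ x = "DESNO" ∨ (PySem.Int.ofStr? x).isSome = true
instance (ukazi : String) : Decidable (Pre_preberi_pot ukazi) := by
  unfold Pre_preberi_pot; infer_instance
def pvWitness_preberi_pot : String := "10\nDESNO\n3\nLEVO\n2"

def Spec_preberi_pot (ukazi : String) (out : List (Int × Int)) : Prop := out = preberi_pot_alt ukazi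
instance (ukazi : String) (out : List (Int × Int)) : Decidable (Spec_preberi_pot ukazi out) := by unfold Spec_preberi_pot; infer_instance

-- ===== CLAIM (what is proved, stated in full; the proofs are below) =====
def Claim_equal_preberi_pot : Prop := ∀ (ukazi : String), Dom_preberi_pot ukazi → Pre_preberi_pot ukazi → Spec_preberi_pot ukazi (preberi_pot ukazi)

-- ===== LEMMAS AND PROOFS =====

-- the tail of positions A appends, as a structural recursion
def runA : (Int × Int) → (Int × Int) → List String → List (Int × Int)
  | _, _, [] => []
  | smer, lega, x :: xs =>
    if x = "LEVO" ∨ x = "DESNO" then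
      runA (if x = "DESNO" then (pvSloD.get? smer).getD (0,0) else (pvSloL.get? smer).getD (0,0)) lega xs
    else
      let n := (PySem.Int.ofStr? x).getD 0
      let lega' := (lega.1 + smer.1 * n, lega.2 + smer.2 * n)
      lega' :: runA smer lega' xs

lemma foldA_eq (xs : List String) : ∀ smer lega sez,
    (xs.foldl pvStepA (smer, lega, sez)).2.2 = sez ++ runA smer lega xs := by
  induction xs with
  | nil => intro smer lega sez; simp [runA]
  | cons x xs ih =>
    intro smer lega sez
    by_cases h : x = "LEVO" ∨ x = "DESNO" <;>
      simp [pvStepA, runA, h, ih]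

-- the deltas B's first pass produces, as a structural recursion
def runB1 : Int → List String → List (Int × Int)
  | _, [] => []
  | h, x :: xs =>
    if x = "DESNO" then runB1 (h+1) xs
    else if x = "LEVO" then runB1 (h-1) xs
    else
      let d := (PySem.List.pyGet? pvDirs (PySem.Int.mod h 4)).getD (0,0)
      let n := (PySem.Int.ofStr? x).getD 0
      (d.1 * n, d.2 * n) :: runB1 h xs

lemma foldB1_eq (xs : List String) : ∀ h ds,
    (xs.foldl pvStepB1 (ds, h)).1 = ds ++ runB1 h xs := by
  induction xs with
  | nil => intro h ds; simp [runB1]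
  | cons x xs ih =>
    intro h ds
    by_cases h1 : x = "DESNO"
    · simp [pvStepB1, runB1, h1, ih]
    · by_cases h2 : x = "LEVO" <;> simp [pvStepB1, runB1, h1, h2, ih]

-- prefix sums of the deltas
def psums : (Int × Int) → List (Int × Int) → List (Int × Int)
  | _, [] => []
  | p, d :: ds => (p.1 + d.1, p.2 + d.2) :: psums (p.1 + d.1, p.2 + d.2) ds

lemma foldB2_eq (ds : List (Int × Int)) : ∀ (l : List (Int × Int)) (p : Int × Int),
    ds.foldl pvStepB2 (l ++ [p]) = (l ++ [p]) ++ psums p ds := by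
  induction ds with
  | nil => intro l p; simp [psums]
  | cons d ds ih =>
    intro l p
    rw [List.foldl_cons]
    have hstep : pvStepB2 (l ++ [p]) d = (l ++ [p]) ++ [(p.1 + d.1, p.2 + d.2)] := by
      simp [pvStepB2]
    rw [hstep, ih (l ++ [p]) (p.1 + d.1, p.2 + d.2)]
    simp [psums]

lemma pymod4 (h : Int) : h % 4 = 0 ∨ h % 4 = 1 ∨ h % 4 = 2 ∨ h % 4 = 3 := by
  omega

-- one right turn in A's dict is +1 on B's heading index
lemma rotD (h : Int) :
    (pvSloD.get? ((PySem.List.pyGet? pvDirs (h % 4)).getD (0,0))).getD (0,0)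
      = (PySem.List.pyGet? pvDirs ((h + 1) % 4)).getD (0,0) := by
  rcases pymod4 h with h0 | h0 | h0 | h0
  · rw [h0, show (h + 1) % 4 = 1 by omega]; decide
  · rw [h0, show (h + 1) % 4 = 2 by omega]; decide
  · rw [h0, show (h + 1) % 4 = 3 by omega]; decide
  · rw [h0, show (h + 1) % 4 = 0 by omega]; decide

-- one left turn in A's dict is -1 on B's heading index
lemma rotL (h : Int) :
    (pvSloL.get? ((PySem.List.pyGet? pvDirs (h % 4)).getD (0,0))).getD (0,0)
      = (PySem.List.pyGet? pvDirs ((h - 1) % 4)).getD (0,0) := by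
  rcases pymod4 h with h0 | h0 | h0 | h0
  · rw [h0, show (h - 1) % 4 = 3 by omega]; decide
  · rw [h0, show (h - 1) % 4 = 0 by omega]; decide
  · rw [h0, show (h - 1) % 4 = 1 by omega]; decide
  · rw [h0, show (h - 1) % 4 = 2 by omega]; decide

-- heading invariant: A's direction tuple is B's table entry at h mod 4
lemma run_eq (xs : List String) : ∀ (h : Int) (lega : Int × Int),
    runA ((PySem.List.pyGet? pvDirs (h % 4)).getD (0,0)) lega xs
      = psums lega (runB1 h xs) := by
  induction xs with
  | nil => intro h lega; simp [runA, runB1, psums]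
  | cons x xs ih =>
    intro h lega
    by_cases hd : x = "DESNO"
    · simp [runA, runB1, hd, rotD h, ih]
    · by_cases hl : x = "LEVO"
      · simp [runA, runB1, hl, rotL h, ih]
      · simp [runA, runB1, hd, hl, psums, ih]

-- ===== VERDICT (by name: the statement is the Claim_ definition above) =====
theorem preberi_pot_spec : Claim_equal_preberi_pot := by
  intro ukazi _ _
  unfold Spec_preberi_pot preberi_pot preberi_pot_alt
  rw [foldA_eq, foldB1_eq]
  have h0 : ((0 : Int), (-1 : Int)) = (PySem.List.pyGet? pvDirs ((0 : Int) % 4)).getD (0,0) := by decide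
  rw [h0, run_eq]
  have h2 := foldB2_eq (runB1 0 ((PySem.Str.split? ukazi "\n").getD [])) [] ((0 : Int), (0 : Int))
  simp only [List.nil_append] at h2
  rw [List.nil_append, h2]
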